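-- pv_equiv track=rewrite | github.com/hellvetica42/PyTetris | utils.py | getNumHoles
-- ===== SOURCE A (Python) =====
-- import copy
--
-- def getNumHoles(board):
--     holes = 0
--
--     def floodFill(b, x, y, count):
--         #if out of range
--         if y < 0 or y >= len(b) or x < 0 or x >= len(b[y]):
--             return 0
--
--         # if already visited
--         if b[y][x] == -1:
--             return 0
--         # if not empty
--         elif b[y][x] != 0:
--             return 0
--         else:
--             b[y][x] = -1
--             count += 1
--
--             floodFill(b, x, y-1, count)
--             floodFill(b, x, y+1, count)
--             floodFill(b, x-1, y, count)
--             floodFill(b, x+1, y, count)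
--
--         return count
--
--     tmpBoard = copy.deepcopy(board)
--
--     for y in range(len(board)):
--         for x in range(len(board[y])):
--             if tmpBoard[y][x] == 0:
--                 holeSize = floodFill(tmpBoard, x, y, 0)
--                 if holeSize < 20 and holeSize > 0:
--                     holes += holeSize
--
--
--     return holes
-- ===== SOURCE B (Python) =====
-- def getNumHoles(board):
--     visited = set()
--     holes = 0
--     for y in range(len(board)):
--         for x in range(len(board[y])):
--             if board[y][x] == 0 and (y, x) not in visited:
--                 holes += 1
--                 stack = [(y, x)]
--                 while stack:
--                     cy, cx = stack.pop()
--                     if 0 <= cy < len(board) and 0 <= cx < len(board[cy]) \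
--                             and board[cy][cx] == 0 and (cy, cx) not in visited:
--                         visited.add((cy, cx))
--                         stack.append((cy, cx + 1))
--                         stack.append((cy, cx - 1))
--                         stack.append((cy + 1, cx))
--                         stack.append((cy - 1, cx))
--     return holes
-- ===== Notes on version B (the rewrite author's own statement) =====
-- stated objective: simpler
-- what changed: Replaces the deep-copy plus recursive board-mutating flood fill (whose per-cell size counter is always 1, so the <20 filter is vacuous) by a single iterative explicit-stack DFS over a visited set that never copies or mutates the board and just counts components of 0-cells.
import Mathlib
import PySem

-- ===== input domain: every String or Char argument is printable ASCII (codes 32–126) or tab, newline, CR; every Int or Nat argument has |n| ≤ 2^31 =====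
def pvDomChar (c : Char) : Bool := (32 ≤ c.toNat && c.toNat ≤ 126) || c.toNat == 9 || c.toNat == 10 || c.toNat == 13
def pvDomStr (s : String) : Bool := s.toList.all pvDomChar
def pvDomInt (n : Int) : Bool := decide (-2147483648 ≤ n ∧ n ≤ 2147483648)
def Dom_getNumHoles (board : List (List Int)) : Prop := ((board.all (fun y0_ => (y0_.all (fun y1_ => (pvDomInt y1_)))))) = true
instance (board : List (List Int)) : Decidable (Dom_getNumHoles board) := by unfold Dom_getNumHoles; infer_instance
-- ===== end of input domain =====

-- B replaces A's deepcopy + recursive board-mutating flood fill by an iterative explicit-stack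
-- DFS over a visited set (no copy, no mutation of the board); same return value, objective: simpler.

-- ===== PORT A =====
-- b[y] (only evaluated by A after the range check; [] default never read in range)
def pvRow (b : List (List Int)) (y : Int) : List Int := (PySem.List.pyGet? b y).getD []

-- b[y][x] = v for in-range nonnegative y, x (the only way A assigns)
def pvSetCell (b : List (List Int)) (x y : Int) (v : Int) : List (List Int) :=
  b.set y.toNat ((pvRow b y).set x.toNat v)

-- A's recursive floodFill; fuel is only a termination device (one unvisited 0-cell is consumed
-- before each nest of recursive calls, so fuel = #cells + 1 is never exhausted).
def floodFillA : Nat → List (List Int) → Int → Int → Int → (List (List Int)) × Int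
  | 0, b, _, _, _ => (b, 0)
  | f+1, b, x, y, count =>
    if y < 0 ∨ (b.length : Int) ≤ y then (b, 0)
    else if x < 0 ∨ ((pvRow b y).length : Int) ≤ x then (b, 0)
    else
      let v := (PySem.List.pyGet? (pvRow b y) x).getD 0
      if v = -1 then (b, 0)
      else if v ≠ 0 then (b, 0)
      else
        let b0 := pvSetCell b x y (-1)
        let count1 := count + 1
        let b1 := (floodFillA f b0 x (y-1) count1).1
        let b2 := (floodFillA f b1 x (y+1) count1).1
        let b3 := (floodFillA f b2 (x-1) y count1).1
        let b4 := (floodFillA f b3 (x+1) y count1).1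
        (b4, count1)

def getNumHoles (board : List (List Int)) : Int :=
  let fuel := (board.map List.length).sum + 1
  let res := (List.range board.length).foldl (fun st y =>
      (List.range ((board.getD y []).length)).foldl (fun st (x : Nat) =>
        if (PySem.List.pyGet? (pvRow st.1 (y:Int)) (x:Int)).getD 0 = 0 then
          let r := floodFillA fuel st.1 (x:Int) (y:Int) 0
          (r.1, if r.2 < 20 ∧ 0 < r.2 then st.2 + r.2 else st.2)
        else st) st) (board, (0:Int))
  res.2

-- ===== PORT B =====
-- B's while-loop over the explicit stack (head = top); fuel is only a termination device
-- (each iteration pops once; at most 1 + 4·#cells pushes ever happen).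
def dfsB (board : List (List Int)) : Nat → PySem.Set (Int × Int) → List (Int × Int) → PySem.Set (Int × Int)
  | 0, visited, _ => visited
  | _+1, visited, [] => visited
  | f+1, visited, (cy, cx) :: rest =>
    if 0 ≤ cy ∧ cy < (board.length : Int) ∧ 0 ≤ cx ∧ cx < ((pvRow board cy).length : Int)
        ∧ (PySem.List.pyGet? (pvRow board cy) cx).getD 0 = 0 ∧ ¬((cy, cx) ∈ visited)
    then dfsB board f (PySem.Set.add visited (cy, cx))
           ((cy - 1, cx) :: (cy + 1, cx) :: (cy, cx - 1) :: (cy, cx + 1) :: rest)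
    else dfsB board f visited rest

def getNumHoles_alt (board : List (List Int)) : Int :=
  let fuel := 5 * (board.map List.length).sum + 5
  let res := (List.range board.length).foldl (fun st y =>
      (List.range ((board.getD y []).length)).foldl (fun st (x : Nat) =>
        if (board.getD y []).getD x 0 = 0 ∧ ¬(((y:Int), (x:Int)) ∈ st.1)
        then (dfsB board fuel st.1 [((y:Int), (x:Int))], st.2 + 1)
        else st) st) (PySem.Set.empty, (0:Int))
  res.2

-- ===== PRECONDITION & SPEC =====
def Spec_getNumHoles (board : List (List Int)) (out : Int) : Prop := out = getNumHoles_alt board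
instance (board : List (List Int)) (out : Int) : Decidable (Spec_getNumHoles board out) := by unfold Spec_getNumHoles; infer_instance

-- ===== CLAIM (what is proved, stated in full; the proofs are below) =====
def Claim_equal_getNumHoles : Prop := ∀ (board : List (List Int)), Dom_getNumHoles board → Spec_getNumHoles board (getNumHoles board)

-- ===== LEMMAS AND PROOFS =====

-- A's tmpBoard is always the original board with the cells of a visited set V overwritten by -1.
def markV (b0 : List (List Int)) (V : List (Int × Int)) : List (List Int) :=
  b0.mapIdx (fun y row => row.mapIdx (fun x v => if ((y:Int),(x:Int)) ∈ V then -1 else v))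

-- positions (as Int pairs) of the 0-cells of the original board
def zpos (b0 : List (List Int)) : List (Int × Int) :=
  (List.range b0.length).flatMap (fun y =>
    (List.range ((b0.getD y []).length)).filterMap (fun x =>
      if (b0.getD y []).getD x 0 = 0 then some ((y:Int),(x:Int)) else none))

-- number of still-unvisited 0-cells: the induction measure
def Zfree (b0 : List (List Int)) (V : List (Int × Int)) : Nat :=
  ((zpos b0).filter (fun p => decide (¬ p ∈ V))).length

-- the common guard of A's flood fill (read on the marked board) and B's loop (read on b0 + V)
def okG (b0 : List (List Int)) (V : List (Int × Int)) (y x : Int) : Prop :=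
  0 ≤ y ∧ y < (b0.length : Int) ∧ 0 ≤ x ∧ x < ((pvRow b0 y).length : Int)
    ∧ (PySem.List.pyGet? (pvRow b0 y) x).getD 0 = 0 ∧ ¬((y, x) ∈ V)

-- canonical-fuel run of B's loop
def dfsC (b0 : List (List Int)) (V : PySem.Set (Int × Int)) (s : List (Int × Int)) : PySem.Set (Int × Int) :=
  dfsB b0 (5 * Zfree b0 V + s.length) V s

lemma pvRow_natCast (b : List (List Int)) (y : Nat) : pvRow b (y : Int) = b.getD y [] := by
  simp [pvRow, List.getD_eq_getElem?_getD]

lemma length_markV (b0 : List (List Int)) (V : List (Int × Int)) :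
    (markV b0 V).length = b0.length := by
  simp [markV]

lemma row_markV (b0 : List (List Int)) (V : List (Int × Int)) (y : Nat) (hy : y < b0.length) :
    (markV b0 V).getD y [] =
      (b0.getD y []).mapIdx (fun x v => if ((y:Int),(x:Int)) ∈ V then -1 else v) := by
  have h1 : y < (markV b0 V).length := by simpa [length_markV] using hy
  rw [List.getD_eq_getElem?_getD, List.getD_eq_getElem?_getD,
      List.getElem?_eq_getElem h1, List.getElem?_eq_getElem hy]
  simp [markV]

lemma cell_markV (b0 : List (List Int)) (V : List (Int × Int)) (y x : Nat)
    (hy : y < b0.length) (hx : x < (b0.getD y []).length) :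
    ((markV b0 V).getD y []).getD x 0 =
      if ((y:Int),(x:Int)) ∈ V then -1 else (b0.getD y []).getD x 0 := by
  rw [row_markV b0 V y hy, List.getD_eq_getElem?_getD, List.getElem?_mapIdx,
      List.getElem?_eq_getElem hx]
  by_cases hm : (((y:Int),(x:Int)) : Int × Int) ∈ V
  · simp [hm]
  · simp only [hm, if_false, Option.map_some, Option.getD_some, List.getD_eq_getElem?_getD]
    rw [List.getElem?_eq_getElem (show x < (b0[y]?.getD ([] : List Int)).length from hx)]
    rfl

lemma mem_app_single (V : List (Int × Int)) (p q : Int × Int) (hne : q ≠ p) :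
    (q ∈ V ++ [p]) ↔ q ∈ V := by
  simp [hne]

lemma markV_getElem? (b0 : List (List Int)) (W : List (Int × Int)) (i : Nat) :
    (markV b0 W)[i]? = Option.map
      (fun row => row.mapIdx (fun x v => if ((i:Int),(x:Int)) ∈ W then -1 else v)) b0[i]? := by
  simp [markV, List.getElem?_mapIdx]

lemma setCell_markV (b0 : List (List Int)) (V : List (Int × Int)) (y x : Nat)
    (hy : y < b0.length) (hx : x < (b0.getD y []).length) :
    pvSetCell (markV b0 V) (x : Int) (y : Int) (-1) = markV b0 (V ++ [((y:Int),(x:Int))]) := by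
  have hge : b0.getD y [] = b0[y] := by
    rw [List.getD_eq_getElem?_getD, List.getElem?_eq_getElem hy]; rfl
  have hrow : pvRow (markV b0 V) (y:Int) =
      (b0[y]).mapIdx (fun x v => if ((y:Int),(x:Int)) ∈ V then -1 else v) := by
    rw [pvRow_natCast, row_markV b0 V y hy, hge]
  have hylen : y < (markV b0 V).length := by rw [length_markV]; exact hy
  apply List.ext_getElem?
  intro i
  simp only [pvSetCell, Int.toNat_natCast]
  rw [hrow, markV_getElem? b0 (V ++ [((y:Int),(x:Int))]) i]
  by_cases hiy : y = i
  · subst hiy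
    rw [List.getElem?_set_self hylen, List.getElem?_eq_getElem hy]
    simp only [Option.map_some, Option.some_inj]
    apply List.ext_getElem?
    intro j
    rw [List.getElem?_set, List.getElem?_mapIdx, List.getElem?_mapIdx]
    by_cases hjx : x = j
    · subst hjx
      have hxb : x < (b0[y]).length := by rw [← hge]; exact hx
      rw [if_pos rfl, if_pos (by simpa using hxb), List.getElem?_eq_getElem hxb]
      have hmp : (((y:Int),(x:Int)) : Int × Int) ∈ V ++ [((y:Int),(x:Int))] := by simp
      simp [hmp]
    · rw [if_neg hjx]
      cases hj : (b0[y])[j]? with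
      | none => rfl
      | some v =>
        simp only [Option.map_some]
        exact congrArg some
          (if_congr ((mem_app_single V _ _ (by simp only [ne_eq, Prod.mk.injEq]; omega)).symm) rfl rfl)
  · have hne : y ≠ i := hiy
    rw [List.getElem?_set_ne hne, markV_getElem? b0 V i]
    cases hr : b0[i]? with
    | none => rfl
    | some r =>
      simp only [Option.map_some, Option.some_inj]
      apply List.ext_getElem?
      intro j
      rw [List.getElem?_mapIdx, List.getElem?_mapIdx]
      cases hj : r[j]? with
      | none => rfl
      | some v =>
        simp only [Option.map_some]
        exact congrArg some
          (if_congr ((mem_app_single V _ _ (by simp only [ne_eq, Prod.mk.injEq]; omega)).symm) rfl rfl)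

lemma mem_zpos (b0 : List (List Int)) (p : Int × Int) :
    p ∈ zpos b0 ↔ ∃ y x : Nat, p = ((y:Int),(x:Int)) ∧ y < b0.length ∧
      x < (b0.getD y []).length ∧ (b0.getD y []).getD x 0 = 0 := by
  simp only [zpos, List.mem_flatMap, List.mem_filterMap, List.mem_range]
  constructor
  · rintro ⟨y, hy, x, hx, hsome⟩
    by_cases hc : (b0.getD y []).getD x 0 = 0
    · rw [if_pos hc] at hsome
      exact ⟨y, x, (Option.some_inj.mp hsome).symm, hy, hx, hc⟩
    · rw [if_neg hc] at hsome; cases hsome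
  · rintro ⟨y, x, rfl, hy, hx, hc⟩
    exact ⟨y, hy, x, hx, by rw [if_pos hc]⟩

lemma filter_lt_of_mem {α : Type} (l : List α) (p q : α → Bool) (hpq : ∀ a, p a = true → q a = true)
    (a : α) (ha : a ∈ l) (hqa : q a = true) (hpa : p a = false) :
    (l.filter p).length < (l.filter q).length := by
  induction l with
  | nil => cases ha
  | cons b t ih =>
    rcases List.mem_cons.mp ha with rfl | hat
    · rw [List.filter_cons, List.filter_cons, if_neg (by simp [hpa]), if_pos (by simp [hqa])]
      have := (List.monotone_filter_right t hpq).length_le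
      simpa using Nat.lt_succ_of_le this
    · by_cases hpb : p b = true
      · have hqb : q b = true := hpq b hpb
        rw [List.filter_cons, List.filter_cons, if_pos (by simp [hpb]), if_pos (by simp [hqb])]
        simpa using ih hat
      · rw [List.filter_cons, if_neg (by simp [hpb])]
        by_cases hqb : q b = true
        · rw [List.filter_cons, if_pos (by simp [hqb])]
          exact Nat.lt_succ_of_lt (ih hat)
        · rw [List.filter_cons, if_neg (by simp [hqb])]
          exact ih hat

lemma Zfree_add_lt (b0 : List (List Int)) (V : List (Int × Int)) (p : Int × Int)
    (hz : p ∈ zpos b0) (hnv : ¬ p ∈ V) : Zfree b0 (V ++ [p]) < Zfree b0 V := by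
  unfold Zfree
  apply filter_lt_of_mem (zpos b0) _ _ ?_ p hz (by simpa using hnv) (by simp)
  intro a ha
  simp only [decide_eq_true_eq, List.mem_append, List.mem_singleton] at *
  exact fun hm => ha (Or.inl hm)

lemma sum_range_getD {α : Type} (l : List α) (g : α → Nat) (d : α) :
    ((List.range l.length).map (fun y => g (l.getD y d))).sum = (l.map g).sum := by
  induction l with
  | nil => simp
  | cons a t ih =>
    rw [List.length_cons, List.range_succ_eq_map]
    simp only [List.map_cons, List.map_map, List.sum_cons, List.getD_cons_zero]
    have : (List.range t.length).map ((fun y => g ((a :: t).getD y d)) ∘ Nat.succ)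
        = (List.range t.length).map (fun y => g (t.getD y d)) := by
      apply List.map_congr_left
      intro x _
      simp
    rw [this, ih]

lemma Zfree_le_total (b0 : List (List Int)) (V : List (Int × Int)) :
    Zfree b0 V ≤ (b0.map List.length).sum := by
  calc Zfree b0 V ≤ (zpos b0).length := List.length_filter_le _ _
    _ ≤ (b0.map List.length).sum := by
        rw [zpos, List.length_flatMap]
        calc ((List.range b0.length).map (fun y =>
                ((List.range ((b0.getD y []).length)).filterMap (fun x =>
                  if (b0.getD y []).getD x 0 = 0 then some ((y:Int),(x:Int)) else none)).length)).sum
            ≤ ((List.range b0.length).map (fun y => (b0.getD y []).length)).sum := by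
              apply List.sum_le_sum
              intro i _
              exact le_trans (List.length_filterMap_le _ _) (by rw [List.length_range])
          _ = (b0.map List.length).sum := sum_range_getD b0 List.length []

lemma okG_mem_zpos (b0 : List (List Int)) (V : List (Int × Int)) (y x : Int)
    (h : okG b0 V y x) : (y, x) ∈ zpos b0 := by
  obtain ⟨h0, h1, h2, h3, h4, -⟩ := h
  rw [mem_zpos]
  have hy' : y = ((y.toNat : Nat) : Int) := (Int.toNat_of_nonneg h0).symm
  have hrow : pvRow b0 y = b0.getD y.toNat [] := by
    conv_lhs => rw [hy', pvRow_natCast]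
  rw [hrow] at h3 h4
  rw [PySem.List.pyGet?_of_nonneg _ h2] at h4
  refine ⟨y.toNat, x.toNat, ?_, by omega, by omega, ?_⟩
  · rw [Int.toNat_of_nonneg h0, Int.toNat_of_nonneg h2]
  · simpa [List.getD_eq_getElem?_getD] using h4

lemma dfsB_nil (b0 : List (List Int)) (f : Nat) (V : PySem.Set (Int × Int)) :
    dfsB b0 f V [] = V := by
  cases f <;> rfl

lemma dfsB_cons_ok (b0 : List (List Int)) (f : Nat) (V : PySem.Set (Int × Int)) (cy cx : Int)
    (rest : List (Int × Int)) (hc : okG b0 V cy cx) :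
    dfsB b0 (f+1) V ((cy, cx) :: rest) = dfsB b0 f (PySem.Set.add V (cy, cx))
      ((cy - 1, cx) :: (cy + 1, cx) :: (cy, cx - 1) :: (cy, cx + 1) :: rest) := by
  have hc' := hc
  unfold okG at hc'
  simp only [dfsB]
  rw [if_pos hc']

lemma dfsB_cons_no (b0 : List (List Int)) (f : Nat) (V : PySem.Set (Int × Int)) (cy cx : Int)
    (rest : List (Int × Int)) (hc : ¬ okG b0 V cy cx) :
    dfsB b0 (f+1) V ((cy, cx) :: rest) = dfsB b0 f V rest := by
  have hc' := hc
  unfold okG at hc'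
  simp only [dfsB]
  rw [if_neg hc']

lemma okG_zfree_pos (b0 : List (List Int)) (V : List (Int × Int)) (y x : Int)
    (h : okG b0 V y x) : 0 < Zfree b0 V := by
  have := Zfree_add_lt b0 V (y, x) (okG_mem_zpos b0 V y x h) h.2.2.2.2.2
  omega

lemma okG_zfree_add_lt (b0 : List (List Int)) (V : List (Int × Int)) (y x : Int)
    (h : okG b0 V y x) : Zfree b0 (V ++ [(y, x)]) < Zfree b0 V :=
  Zfree_add_lt b0 V (y, x) (okG_mem_zpos b0 V y x h) h.2.2.2.2.2

lemma dfsB_irr (b0 : List (List Int)) :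
    ∀ n f1 f2 (V : PySem.Set (Int × Int)) (s : List (Int × Int)),
      5 * Zfree b0 V + s.length ≤ n → n ≤ f1 → n ≤ f2 →
      dfsB b0 f1 V s = dfsB b0 f2 V s := by
  intro n
  induction n with
  | zero =>
    intro f1 f2 V s hm h1 h2
    have hs : s = [] := by cases s with | nil => rfl | cons a t => simp at hm
    subst hs
    rw [dfsB_nil, dfsB_nil]
  | succ n ih =>
    intro f1 f2 V s hm h1 h2
    cases s with
    | nil => rw [dfsB_nil, dfsB_nil]
    | cons p rest =>
      obtain ⟨cy, cx⟩ := p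
      cases f1 with
      | zero => omega
      | succ f1' =>
        cases f2 with
        | zero => omega
        | succ f2' =>
          by_cases hc : okG b0 V cy cx
          · rw [dfsB_cons_ok b0 f1' V cy cx rest hc, dfsB_cons_ok b0 f2' V cy cx rest hc]
            have hnv : ¬ ((cy, cx) ∈ V) := hc.2.2.2.2.2
            have hadd : PySem.Set.add V (cy, cx) = V ++ [(cy, cx)] :=
              PySem.Set.add_of_not_mem hnv
            have hz : Zfree b0 (V ++ [(cy, cx)]) < Zfree b0 V := okG_zfree_add_lt b0 V cy cx hc
            apply ih
            · rw [hadd]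
              simp only [List.length_cons] at hm ⊢
              omega
            · omega
            · omega
          · rw [dfsB_cons_no b0 f1' V cy cx rest hc, dfsB_cons_no b0 f2' V cy cx rest hc]
            apply ih
            · simp only [List.length_cons] at hm
              omega
            · omega
            · omega

lemma dfsB_eq_dfsC (b0 : List (List Int)) (f : Nat) (V : PySem.Set (Int × Int))
    (s : List (Int × Int)) (hf : 5 * Zfree b0 V + s.length ≤ f) :
    dfsB b0 f V s = dfsC b0 V s := by
  exact dfsB_irr b0 (5 * Zfree b0 V + s.length) f _ V s le_rfl hf le_rfl

lemma dfsC_nil (b0 : List (List Int)) (V : PySem.Set (Int × Int)) : dfsC b0 V [] = V := by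
  simpa [dfsC] using dfsB_nil b0 _ V

lemma dfsC_cons_ok (b0 : List (List Int)) (V : PySem.Set (Int × Int)) (cy cx : Int)
    (rest : List (Int × Int)) (hok : okG b0 V cy cx) :
    dfsC b0 V ((cy, cx) :: rest) =
      dfsC b0 (PySem.Set.add V (cy, cx))
        ((cy - 1, cx) :: (cy + 1, cx) :: (cy, cx - 1) :: (cy, cx + 1) :: rest) := by
  have hnv : ¬ ((cy, cx) ∈ V) := hok.2.2.2.2.2
  have hadd : PySem.Set.add V (cy, cx) = V ++ [(cy, cx)] := PySem.Set.add_of_not_mem hnv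
  have hz : Zfree b0 (V ++ [(cy, cx)]) < Zfree b0 V := okG_zfree_add_lt b0 V cy cx hok
  unfold dfsC
  have hk : 5 * Zfree b0 V + ((cy, cx) :: rest).length
      = (5 * Zfree b0 V + rest.length) + 1 := by
    simp only [List.length_cons]
    omega
  rw [hk, dfsB_cons_ok b0 _ V cy cx rest hok]
  apply dfsB_eq_dfsC
  rw [hadd]
  simp only [List.length_cons]
  omega

lemma dfsC_cons_no (b0 : List (List Int)) (V : PySem.Set (Int × Int)) (cy cx : Int)
    (rest : List (Int × Int)) (hok : ¬ okG b0 V cy cx) :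
    dfsC b0 V ((cy, cx) :: rest) = dfsC b0 V rest := by
  unfold dfsC
  have hk : 5 * Zfree b0 V + ((cy, cx) :: rest).length
      = (5 * Zfree b0 V + rest.length) + 1 := by
    simp only [List.length_cons]
    omega
  rw [hk, dfsB_cons_no b0 _ V cy cx rest hok]

lemma rowlen_markV (b0 : List (List Int)) (V : List (Int × Int)) (y : Int)
    (h0 : 0 ≤ y) (h1 : y < (b0.length : Int)) :
    (pvRow (markV b0 V) y).length = (pvRow b0 y).length := by
  have hy' : y = ((y.toNat : Nat) : Int) := (Int.toNat_of_nonneg h0).symm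
  have hyb : y.toNat < b0.length := by omega
  conv_lhs => rw [hy', pvRow_natCast]
  conv_rhs => rw [hy', pvRow_natCast]
  rw [row_markV b0 V y.toNat hyb]
  simp

lemma cellI_markV (b0 : List (List Int)) (V : List (Int × Int)) (y x : Int)
    (h0 : 0 ≤ y) (h1 : y < (b0.length : Int)) (h2 : 0 ≤ x)
    (h3 : x < ((pvRow b0 y).length : Int)) :
    (PySem.List.pyGet? (pvRow (markV b0 V) y) x).getD 0
      = if (y, x) ∈ V then -1 else (PySem.List.pyGet? (pvRow b0 y) x).getD 0 := by
  have hy' : y = ((y.toNat : Nat) : Int) := (Int.toNat_of_nonneg h0).symm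
  have hx' : x = ((x.toNat : Nat) : Int) := (Int.toNat_of_nonneg h2).symm
  have hyb : y.toNat < b0.length := by omega
  have hrow0 : pvRow b0 y = b0.getD y.toNat [] := by
    conv_lhs => rw [hy', pvRow_natCast]
  have hxb : x.toNat < (b0.getD y.toNat []).length := by
    rw [hrow0] at h3; omega
  have hrowM : pvRow (markV b0 V) y = (markV b0 V).getD y.toNat [] := by
    conv_lhs => rw [hy', pvRow_natCast]
  rw [hrowM, hrow0, PySem.List.pyGet?_of_nonneg _ h2, PySem.List.pyGet?_of_nonneg _ h2,
      ← List.getD_eq_getElem?_getD, ← List.getD_eq_getElem?_getD,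
      cell_markV b0 V y.toNat x.toNat hyb hxb]
  rw [show (((y.toNat : Nat) : Int), ((x.toNat : Nat) : Int)) = (y, x) by
    rw [Int.toNat_of_nonneg h0, Int.toNat_of_nonneg h2]]

lemma setI_markV (b0 : List (List Int)) (V : List (Int × Int)) (y x : Int)
    (h0 : 0 ≤ y) (h1 : y < (b0.length : Int)) (h2 : 0 ≤ x)
    (h3 : x < ((pvRow b0 y).length : Int)) :
    pvSetCell (markV b0 V) x y (-1) = markV b0 (V ++ [(y, x)]) := by
  have hy' : y = ((y.toNat : Nat) : Int) := (Int.toNat_of_nonneg h0).symm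
  have hx' : x = ((x.toNat : Nat) : Int) := (Int.toNat_of_nonneg h2).symm
  have hyb : y.toNat < b0.length := by omega
  have hrow0 : pvRow b0 y = b0.getD y.toNat [] := by
    conv_lhs => rw [hy', pvRow_natCast]
  have hxb : x.toNat < (b0.getD y.toNat []).length := by
    rw [hrow0] at h3; omega
  rw [hy', hx']
  exact setCell_markV b0 V y.toNat x.toNat hyb hxb

lemma flood_noop (b0 : List (List Int)) (V : List (Int × Int)) (x y : Int)
    (hok : ¬ okG b0 V y x) :
    ∀ (c : Int) (f : Nat), 0 < f → floodFillA f (markV b0 V) x y c = (markV b0 V, 0) := by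
  intro c f hf
  obtain ⟨f', rfl⟩ : ∃ k, f = k + 1 := ⟨f - 1, by omega⟩
  simp only [floodFillA]
  by_cases g1 : y < 0 ∨ (((markV b0 V).length : Nat) : Int) ≤ y
  · rw [if_pos g1]
  · rw [if_neg g1]
    have g1a' : 0 ≤ y := by omega
    have hy1 : y < (b0.length : Int) := by
      have := length_markV b0 V
      omega
    by_cases g2 : x < 0 ∨ (((pvRow (markV b0 V) y).length : Nat) : Int) ≤ x
    · rw [if_pos g2]
    · rw [if_neg g2]
      have g2a' : 0 ≤ x := by omega
      have hx1 : x < ((pvRow b0 y).length : Int) := by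
        have := rowlen_markV b0 V y g1a' hy1
        omega
      have hcell := cellI_markV b0 V y x g1a' hy1 g2a' hx1
      rw [hcell]
      by_cases hmem : ((y, x) : Int × Int) ∈ V
      · rw [if_pos hmem, if_pos rfl]
      · rw [if_neg hmem]
        have horig : ¬ (PySem.List.pyGet? (pvRow b0 y) x).getD 0 = 0 := by
          intro h
          exact hok ⟨g1a', hy1, g2a', hx1, h, hmem⟩
        by_cases hneg1 : (PySem.List.pyGet? (pvRow b0 y) x).getD 0 = -1
        · rw [if_pos hneg1]
        · rw [if_neg hneg1, if_pos horig]

lemma flood_sim_noop (b0 : List (List Int)) (V : List (Int × Int)) (x y : Int)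
    (hok : ¬ okG b0 V y x) :
    ∃ V' : List (Int × Int),
      (∀ p ∈ V, p ∈ V') ∧ Zfree b0 V' ≤ Zfree b0 V ∧
      (∀ (c : Int) (f : Nat), Zfree b0 V < f →
        (floodFillA f (markV b0 V) x y c).1 = markV b0 V') ∧
      (okG b0 V y x → ∀ (c : Int) (f : Nat), Zfree b0 V < f →
        (floodFillA f (markV b0 V) x y c).2 = c + 1) ∧
      (∀ s, dfsC b0 V ((y, x) :: s) = dfsC b0 V' s) := by
  refine ⟨V, fun p hp => hp, le_rfl, ?_, fun h => absurd h hok, fun s => dfsC_cons_no b0 V y x s hok⟩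
  intro c f hf
  rw [flood_noop b0 V x y hok c f (by omega)]

lemma flood_sim (b0 : List (List Int)) :
    ∀ n (V : List (Int × Int)) (x y : Int), Zfree b0 V ≤ n →
    ∃ V' : List (Int × Int),
      (∀ p ∈ V, p ∈ V') ∧ Zfree b0 V' ≤ Zfree b0 V ∧
      (∀ (c : Int) (f : Nat), Zfree b0 V < f →
        (floodFillA f (markV b0 V) x y c).1 = markV b0 V') ∧
      (okG b0 V y x → ∀ (c : Int) (f : Nat), Zfree b0 V < f →
        (floodFillA f (markV b0 V) x y c).2 = c + 1) ∧
      (∀ s, dfsC b0 V ((y, x) :: s) = dfsC b0 V' s) := by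
  intro n
  induction n with
  | zero =>
    intro V x y hn
    by_cases hok : okG b0 V y x
    · have := okG_zfree_pos b0 V y x hok
      omega
    · exact flood_sim_noop b0 V x y hok
  | succ n ih =>
    intro V x y hn
    by_cases hok : okG b0 V y x
    · obtain ⟨h0, h1, h2, h3, h4, h5⟩ := hok
      have hadd : PySem.Set.add V (y, x) = V ++ [(y, x)] := PySem.Set.add_of_not_mem h5
      have hz1 : Zfree b0 (V ++ [(y, x)]) < Zfree b0 V :=
        okG_zfree_add_lt b0 V y x ⟨h0, h1, h2, h3, h4, h5⟩
      obtain ⟨V2, sub2, le2, fst2, snd2, dfs2⟩ :=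
        ih (V ++ [(y, x)]) x (y - 1) (by omega)
      obtain ⟨V3, sub3, le3, fst3, snd3, dfs3⟩ := ih V2 x (y + 1) (by omega)
      obtain ⟨V4, sub4, le4, fst4, snd4, dfs4⟩ := ih V3 (x - 1) y (by omega)
      obtain ⟨V5, sub5, le5, fst5, snd5, dfs5⟩ := ih V4 (x + 1) y (by omega)
      have heq : ∀ (c : Int) (f : Nat), Zfree b0 V < f →
          floodFillA f (markV b0 V) x y c = (markV b0 V5, c + 1) := by
        intro c f hf
        obtain ⟨f', rfl⟩ : ∃ k, f = k + 1 := ⟨f - 1, by omega⟩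
        simp only [floodFillA]
        have g1 : ¬ (y < 0 ∨ (((markV b0 V).length : Nat) : Int) ≤ y) := by
          rw [length_markV]
          omega
        have g2 : ¬ (x < 0 ∨ (((pvRow (markV b0 V) y).length : Nat) : Int) ≤ x) := by
          rw [rowlen_markV b0 V y h0 h1]
          omega
        rw [if_neg g1, if_neg g2]
        have hcell : (PySem.List.pyGet? (pvRow (markV b0 V) y) x).getD 0 = 0 := by
          rw [cellI_markV b0 V y x h0 h1 h2 h3, if_neg h5]
          exact h4
        rw [hcell, if_neg (by decide : ¬ ((0:Int) = -1)), if_neg (by simp)]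
        rw [setI_markV b0 V y x h0 h1 h2 h3]
        rw [fst2 (c + 1) f' (by omega)]
        rw [fst3 (c + 1) f' (by omega)]
        rw [fst4 (c + 1) f' (by omega)]
        rw [fst5 (c + 1) f' (by omega)]
      refine ⟨V5, ?_, ?_, ?_, ?_, ?_⟩
      · intro p hp
        exact sub5 p (sub4 p (sub3 p (sub2 p (List.mem_append_left _ hp))))
      · omega
      · intro c f hf
        rw [heq c f hf]
      · intro _ c f hf
        rw [heq c f hf]
      · intro s
        rw [dfsC_cons_ok b0 V y x s ⟨h0, h1, h2, h3, h4, h5⟩, hadd, dfs2, dfs3, dfs4, dfs5]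
    · exact flood_sim_noop b0 V x y hok

lemma markV_nil (b0 : List (List Int)) : markV b0 [] = b0 := by
  apply List.ext_getElem?
  intro i
  rw [markV, List.getElem?_mapIdx]
  cases hr : b0[i]? with
  | none => rfl
  | some r =>
    simp only [Option.map_some, Option.some_inj, List.not_mem_nil, if_false]
    apply List.ext_getElem?
    intro j
    rw [List.getElem?_mapIdx]
    cases hj : r[j]? with
    | none => rfl
    | some v => rfl

-- the per-cell bodies of the two outer double loops, as they occur in the ports
def stepA (b0 : List (List Int)) (y : Nat) (st : List (List Int) × Int) (x : Nat) :
    List (List Int) × Int :=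
  if (PySem.List.pyGet? (pvRow st.1 (y:Int)) (x:Int)).getD 0 = 0 then
    let r := floodFillA ((b0.map List.length).sum + 1) st.1 (x:Int) (y:Int) 0
    (r.1, if r.2 < 20 ∧ 0 < r.2 then st.2 + r.2 else st.2)
  else st

def stepB (b0 : List (List Int)) (y : Nat) (st : PySem.Set (Int × Int) × Int) (x : Nat) :
    PySem.Set (Int × Int) × Int :=
  if (b0.getD y []).getD x 0 = 0 ∧ ¬(((y:Int), (x:Int)) ∈ st.1)
  then (dfsB b0 (5 * (b0.map List.length).sum + 5) st.1 [((y:Int), (x:Int))], st.2 + 1)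
  else st

lemma getNumHoles_eq (b0 : List (List Int)) :
    getNumHoles b0 = ((List.range b0.length).foldl (fun st y =>
      (List.range ((b0.getD y []).length)).foldl (stepA b0 y) st) (b0, (0:Int))).2 := by
  unfold getNumHoles stepA
  rfl

lemma getNumHoles_alt_eq (b0 : List (List Int)) :
    getNumHoles_alt b0 = ((List.range b0.length).foldl (fun st y =>
      (List.range ((b0.getD y []).length)).foldl (stepB b0 y) st) (([] : List (Int × Int)), (0:Int))).2 := by
  unfold getNumHoles_alt stepB
  rfl

lemma inner_sim (b0 : List (List Int)) (y : Nat) (hy : y < b0.length) :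
    ∀ (xl : List Nat), (∀ x ∈ xl, x < (b0.getD y []).length) →
    ∀ (V : List (Int × Int)) (h : Int),
      xl.foldl (stepA b0 y) (markV b0 V, h)
        = (markV b0 (xl.foldl (stepB b0 y) (V, h)).1, (xl.foldl (stepB b0 y) (V, h)).2) := by
  intro xl
  induction xl with
  | nil => intro _ V h; rfl
  | cons x xs ihx =>
    intro hbound V h
    have hxb : x < (b0.getD y []).length := hbound x (List.mem_cons_self)
    have hyI : ((y:Nat):Int) < (b0.length : Int) := by omega
    have hrow0 : pvRow b0 ((y:Nat):Int) = b0.getD y [] := pvRow_natCast b0 y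
    have hxI : ((x:Nat):Int) < ((pvRow b0 ((y:Nat):Int)).length : Int) := by
      rw [hrow0]; omega
    have horig : (PySem.List.pyGet? (pvRow b0 ((y:Nat):Int)) ((x:Nat):Int)).getD 0
        = (b0.getD y []).getD x 0 := by
      rw [hrow0, PySem.List.pyGet?_natCast, ← List.getD_eq_getElem?_getD]
    have hcell := cellI_markV b0 V ((y:Nat):Int) ((x:Nat):Int)
      (by omega) hyI (by omega) hxI
    rw [List.foldl_cons, List.foldl_cons]
    by_cases hg : (b0.getD y []).getD x 0 = 0 ∧ ¬((((y:Nat):Int), ((x:Nat):Int)) ∈ V)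
    · have hok : okG b0 V ((y:Nat):Int) ((x:Nat):Int) := by
        refine ⟨by omega, hyI, by omega, hxI, ?_, hg.2⟩
        rw [horig]; exact hg.1
      obtain ⟨V', sub', le', fst', snd', dfs'⟩ := flood_sim b0 (Zfree b0 V) V _ _ le_rfl
      have hfuelA : Zfree b0 V < (b0.map List.length).sum + 1 := by
        have := Zfree_le_total b0 V; omega
      have hA : stepA b0 y (markV b0 V, h) x = (markV b0 V', h + 1) := by
        simp only [stepA]
        rw [if_pos (by rw [hcell, if_neg hg.2]; rw [horig]; exact hg.1)]
        rw [fst' 0 _ hfuelA, snd' hok 0 _ hfuelA]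
        norm_num
      have hB : stepB b0 y (V, h) x = (V', h + 1) := by
        simp only [stepB]
        rw [if_pos hg]
        have hfuelB : 5 * Zfree b0 V + ([(((y:Nat):Int), ((x:Nat):Int))] : List (Int × Int)).length
            ≤ 5 * (b0.map List.length).sum + 5 := by
          have := Zfree_le_total b0 V; simp only [List.length_cons, List.length_nil]; omega
        rw [dfsB_eq_dfsC b0 _ V _ hfuelB, dfs' [], dfsC_nil]
      rw [hA, hB]
      exact ihx (fun a ha => hbound a (List.mem_cons_of_mem _ ha)) V' (h + 1)
    · have hA : stepA b0 y (markV b0 V, h) x = (markV b0 V, h) := by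
        simp only [stepA]
        rw [if_neg ?_]
        rw [hcell]
        by_cases hmem : ((((y:Nat):Int), ((x:Nat):Int)) : Int × Int) ∈ V
        · rw [if_pos hmem]; decide
        · rw [if_neg hmem, horig]
          intro hzero
          exact hg ⟨hzero, hmem⟩
      have hB : stepB b0 y (V, h) x = (V, h) := by
        simp only [stepB]
        rw [if_neg hg]
      rw [hA, hB]
      exact ihx (fun a ha => hbound a (List.mem_cons_of_mem _ ha)) V h

lemma outer_sim_fold (b0 : List (List Int)) :
    ∀ (yl : List Nat), (∀ y ∈ yl, y < b0.length) →
    ∀ (V : List (Int × Int)) (h : Int),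
      yl.foldl (fun st y => (List.range ((b0.getD y []).length)).foldl (stepA b0 y) st) (markV b0 V, h)
        = (markV b0 ((yl.foldl (fun st y => (List.range ((b0.getD y []).length)).foldl (stepB b0 y) st) (V, h)).1),
           (yl.foldl (fun st y => (List.range ((b0.getD y []).length)).foldl (stepB b0 y) st) (V, h)).2) := by
  intro yl
  induction yl with
  | nil => intro _ V h; rfl
  | cons y ys ihy =>
    intro hbound V h
    have hy : y < b0.length := hbound y (List.mem_cons_self)
    rw [List.foldl_cons, List.foldl_cons]
    rw [inner_sim b0 y hy (List.range ((b0.getD y []).length))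
      (fun a ha => List.mem_range.mp ha) V h]
    exact ihy (fun a ha => hbound a (List.mem_cons_of_mem _ ha)) _ _

lemma outer_sim (b0 : List (List Int)) : getNumHoles b0 = getNumHoles_alt b0 := by
  rw [getNumHoles_eq, getNumHoles_alt_eq]
  have h := outer_sim_fold b0 (List.range b0.length)
    (fun a ha => List.mem_range.mp ha) [] 0
  rw [markV_nil] at h
  rw [h]

-- ===== VERDICT (by name: the statement is the Claim_ definition above) =====
theorem getNumHoles_spec : Claim_equal_getNumHoles := by
  intro board _
  unfold Spec_getNumHoles
  exact outer_sim board
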